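-- pv_equiv track=rewrite | github.com/lidiiakliuchna/NLP_project | main.py | predict_language
-- ===== SOURCE A (Python) =====
-- from string import punctuation
--
-- def n_grams(a, n):
--     return [a[i:i+n] for i in range(len(a)-n+1)]
--
-- def predict_language(text, lang2char):
--     table = str.maketrans({ch: None for ch in punctuation})
--     text_ngrams = set(n_grams(text.lower().translate(table), 3))
--
--     lang2sim = {}
--
--     for lang, char_ngrams_set in lang2char.items():
--         intersect = len(text_ngrams & char_ngrams_set)
--         lang2sim[lang] = intersect
--
--     return max(lang2sim, key=lambda x: lang2sim[x])
-- ===== SOURCE B (Python) =====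
-- from string import punctuation
--
-- def predict_language(text, lang2char):
--     cleaned = [ch for ch in text.lower() if ch not in punctuation]
--     grams = set(map(''.join, zip(cleaned, cleaned[1:], cleaned[2:])))
--     # inverted index: trigram -> languages whose character set contains it
--     index = {}
--     score = {}
--     for lang, charset in lang2char.items():
--         score[lang] = 0
--         for g in charset:
--             index.setdefault(g, []).append(lang)
--     # gram-major scoring: one index lookup per text trigram
--     for g in grams:
--         for lang in index.get(g, ()):
--             score[lang] += 1
--     return max(score, key=score.get)
-- ===== Notes on version B (the rewrite author's own statement) =====
-- stated objective: alternative
-- what changed: B scores gram-major through an inverted index (trigram -> languages built once from lang2char) instead of A's language-major per-language set intersection, then takes the argmax of the zero-initialised score dict; Pre_ excludes the empty mapping (both raise ValueError) and association lists with duplicate language keys or duplicate elements inside a character set, which the Python dict-of-sets argument cannot represent.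
-- outside the precondition, e.g. on predict_language('abc', {}): A raises ValueError, B raises ValueError
import Mathlib
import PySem

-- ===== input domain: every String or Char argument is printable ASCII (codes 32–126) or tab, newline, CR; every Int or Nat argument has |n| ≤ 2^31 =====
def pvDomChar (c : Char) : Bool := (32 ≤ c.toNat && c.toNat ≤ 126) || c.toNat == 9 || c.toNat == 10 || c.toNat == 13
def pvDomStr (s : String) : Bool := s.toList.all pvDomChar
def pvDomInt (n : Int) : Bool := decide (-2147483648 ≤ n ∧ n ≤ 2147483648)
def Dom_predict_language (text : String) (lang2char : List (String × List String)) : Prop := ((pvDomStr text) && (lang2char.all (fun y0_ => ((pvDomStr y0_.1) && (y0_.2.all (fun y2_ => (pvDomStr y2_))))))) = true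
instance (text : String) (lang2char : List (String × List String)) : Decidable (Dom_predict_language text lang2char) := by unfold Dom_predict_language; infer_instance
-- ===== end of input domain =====

-- B scores gram-major through an inverted index (trigram -> languages) built once from
-- lang2char, instead of A's language-major per-language set intersection (objective:
-- alternative algorithm/data structure, same asymptotic cost).

-- ===== PORT A =====
-- string.punctuation (module constant both versions import)
def pvPunct : List Char := "!\"#$%&'()*+,-./:;<=>?@[\\]^_`{|}~".toList

-- helper n_grams(a, n) = [a[i:i+n] for i in range(len(a)-n+1)]; the string argument is
-- carried as its character list, each slice rebuilt into a String (exact: a Python string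
-- slice is the corresponding sublist of characters)
def n_grams (a : List Char) (n : Int) : List String :=
  (PySem.List.pyRange 0 ((a.length : Int) - n + 1) 1).map
    (fun i => String.ofList (PySem.List.slice a (some i) (some (i + n))))

def predict_language (text : String) (lang2char : List (String × List String)) : String :=
  -- str.maketrans({ch: None for ch in punctuation}) + translate deletes exactly the
  -- punctuation characters: exact as a filter on the character list (lower() via PySem)
  let cleaned := (PySem.Str.lower text).toList.filter (fun c => !(pvPunct.contains c))
  let text_ngrams : PySem.Set String := PySem.Set.ofList (n_grams cleaned 3)
  let lang2sim : PySem.Dict String Int :=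
    lang2char.foldl
      (fun d p => d.insert p.1 (PySem.Set.len (PySem.Set.inter text_ngrams p.2)))
      PySem.Dict.empty
  -- max(lang2sim, key=lambda x: lang2sim[x]): first key (insertion order) with maximal
  -- value; lang2sim[x] never misses a key here, so getD is exact; "" only on the empty
  -- dict, where Python raises ValueError (excluded by Pre_)
  (PySem.List.max? lang2sim.keys (fun k => lang2sim.getD k 0)).getD ""

-- ===== PORT B =====
def predict_language_alt (text : String) (lang2char : List (String × List String)) : String :=
  let cleaned := (PySem.Str.lower text).toList.filter (fun c => !(pvPunct.contains c))
  -- set(map(''.join, zip(cleaned, cleaned[1:], cleaned[2:])))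
  let grams : PySem.Set String :=
    PySem.Set.ofList (((cleaned.zip (cleaned.drop 1)).zip (cleaned.drop 2)).map
      (fun x => String.ofList [x.1.1, x.1.2, x.2]))
  -- one loop, two dicts: score[lang] = 0 and index.setdefault(g, []).append(lang)
  -- (setdefault+append is exactly Dict.modify with default [])
  let si : PySem.Dict String Int × PySem.Dict String (List String) :=
    lang2char.foldl
      (fun si p =>
        (si.1.insert p.1 0,
         p.2.foldl (fun d g => d.modify g [] (fun ls => ls ++ [p.1])) si.2))
      (PySem.Dict.empty, PySem.Dict.empty)
  -- gram-major scoring: for g in grams: for lang in index.get(g, ()): score[lang] += 1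
  -- (score[lang] += 1 is Dict.modify lang 0 (+1); lang is always a key of score here,
  -- so the default is never used — exact)
  let score : PySem.Dict String Int :=
    grams.foldl
      (fun sc g => (si.2.getD g []).foldl (fun sc l => sc.modify l 0 (· + 1)) sc)
      si.1
  -- max(score, key=score.get): first key (insertion order) with maximal value; "" only
  -- on the empty dict, where Python raises ValueError (excluded by Pre_)
  (PySem.List.max? score.keys (fun k => score.getD k 0)).getD ""

-- ===== PRECONDITION & SPEC =====
-- Pre_ excludes the empty mapping, on which both programs raise ValueError, and
-- association lists with duplicate language keys or duplicate strings inside a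
-- character-set list, which the Python argument (a dict of sets) cannot represent.
def Pre_predict_language (text : String) (lang2char : List (String × List String)) : Prop :=
  lang2char ≠ [] ∧ (lang2char.map Prod.fst).Nodup ∧ ∀ p ∈ lang2char, p.2.Nodup
instance (text : String) (lang2char : List (String × List String)) : Decidable (Pre_predict_language text lang2char) := by unfold Pre_predict_language; infer_instance
def pvWitness_predict_language : String × (List (String × List String)) :=
  ("abcd ef", [("en", ["abc", "xyz"]), ("fr", ["bcd"])])

def Spec_predict_language (text : String) (lang2char : List (String × List String)) (out : String) : Prop := out = predict_language_alt text lang2char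
instance (text : String) (lang2char : List (String × List String)) (out : String) : Decidable (Spec_predict_language text lang2char out) := by unfold Spec_predict_language; infer_instance

-- ===== CLAIM (what is proved, stated in full; the proofs are below) =====
def Claim_equal_predict_language : Prop := ∀ (text : String) (lang2char : List (String × List String)), Dom_predict_language text lang2char → Pre_predict_language text lang2char → Spec_predict_language text lang2char (predict_language text lang2char)

-- ===== LEMMAS AND PROOFS =====

-- take 3 of a list with at least 3 elements, spelled out
lemma pv_take_three (l : List Char) (h : 3 ≤ l.length) :
    l.take 3 = [l[0], l[1], l[2]] := by
  match l, h with
  | a :: b :: c :: rest, _ => simp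

-- the two trigram constructions produce the same list
lemma pv_grams_eq (cs : List Char) :
    n_grams cs 3 =
      ((cs.zip (cs.drop 1)).zip (cs.drop 2)).map (fun x => String.ofList [x.1.1, x.1.2, x.2]) := by
  apply List.ext_getElem
  · simp [n_grams, PySem.List.length_pyRange_one]
    omega
  · intro k h1 h2
    have hk : k + 3 ≤ cs.length := by
      simp at h2; omega
    simp [n_grams, PySem.List.getElem_pyRange_one]
    rw [show (some ((k : Int) + 3)) = some (((k : Nat) : Int) + ((3 : Nat) : Int)) by norm_num,
      PySem.List.slice_natCast_add]
    rw [pv_take_three _ (by simp; omega)]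
    simp [show k + 1 = 1 + k by omega, show k + 2 = 2 + k by omega]

-- A's per-language score is the count of text trigrams present in the char set
lemma pv_inter_len (tn cs : List String) :
    PySem.Set.len (PySem.Set.inter tn cs) = ((tn.countP (fun g => cs.contains g) : Nat) : Int) := by
  simp [PySem.Set.len, PySem.Set.inter, PySem.Set.contains, List.countP_eq_length_filter]

-- B's pair of dicts is two independent folds
lemma pv_si_split (L : List (String × List String))
    (sc0 : PySem.Dict String Int) (idx0 : PySem.Dict String (List String)) :
    L.foldl
      (fun si p =>
        (si.1.insert p.1 (0 : Int),
         p.2.foldl (fun d g => d.modify g [] (fun ls => ls ++ [p.1])) si.2))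
      (sc0, idx0) =
    (L.foldl (fun sc p => sc.insert p.1 0) sc0,
     L.foldl (fun d p => p.2.foldl (fun d g => d.modify g [] (fun ls => ls ++ [p.1])) d) idx0) := by
  induction L generalizing sc0 idx0 with
  | nil => rfl
  | cons p t ih => simp only [List.foldl_cons]; exact ih _ _

-- the index-building double loop is one fold over the flattened (gram, lang) pairs
lemma pv_idx_flatten (L : List (String × List String)) (d : PySem.Dict String (List String)) :
    L.foldl (fun d p => p.2.foldl (fun d g => d.modify g [] (fun ls => ls ++ [p.1])) d) d =
    (L.flatMap (fun p => p.2.map (fun g => (g, p.1)))).foldl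
      (fun d q => d.modify q.1 [] (fun ls => ls ++ [q.2])) d := by
  induction L generalizing d with
  | nil => rfl
  | cons p t ih =>
    simp only [List.foldl_cons, List.flatMap_cons, List.foldl_append, List.foldl_map]
    exact ih _

-- the gram-major double loop is one fold over the flattened increment list
lemma pv_sc_flatten (gs : List String) (h : String → List String) (sc : PySem.Dict String Int) :
    gs.foldl (fun sc g => (h g).foldl (fun sc l => sc.modify l 0 (· + 1)) sc) sc =
    (gs.flatMap h).foldl (fun sc l => sc.modify l 0 (· + 1)) sc := by
  induction gs generalizing sc with
  | nil => rfl
  | cons g t ih =>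
    simp only [List.foldl_cons, List.flatMap_cons, List.foldl_append]
    exact ih _

-- the zero-initialising loop leaves every default-0 lookup at 0
lemma pv_sc0_getD (L : List (String × List String)) (d : PySem.Dict String Int)
    (hd : ∀ k, d.getD k 0 = 0) (k : String) :
    (L.foldl (fun sc p => sc.insert p.1 (0 : Int)) d).getD k 0 = 0 := by
  induction L generalizing d with
  | nil => exact hd k
  | cons p t ih =>
    simp only [List.foldl_cons]
    refine ih _ (fun k' => ?_)
    rw [PySem.Dict.getD_insert]
    split
    · rfl
    · exact hd k' 

-- count over a flatMap is the sum of the per-block counts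
lemma pv_count_flatMap (gs : List String) (h : String → List String) (k : String) :
    (gs.flatMap h).count k = (gs.map (fun g => (h g).count k)).sum := by
  simp [List.count_flatMap, Function.comp_def]

-- one index block's count of a language: the entry contributes 1 iff it is the entry
-- for that language and its (duplicate-free) char set contains the gram
lemma pv_entry_count (p : String × List String) (g k : String) (hnd : p.2.Nodup) :
    (((p.2.map (fun g' => (g', p.1))).filter (fun q => q.1 == g)).map
        (fun q : String × String => q.2)).count k =
    if p.1 = k ∧ g ∈ p.2 then 1 else 0 := by
  rw [List.filter_map, List.map_map]
  have hconst : ∀ l' : List String,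
      (l'.map ((fun q : String × String => q.2) ∘ (fun g' => (g', p.1)))).count k =
      if p.1 = k then l'.length else 0 := by
    intro l'
    have hrep : l'.map ((fun q : String × String => q.2) ∘ (fun g' => (g', p.1))) =
        List.replicate l'.length p.1 := by
      simp [Function.comp_def, List.map_const']
    rw [hrep, List.count_replicate]
    by_cases hp : p.1 = k <;> simp [hp]
  rw [hconst]
  have hlen : (p.2.filter ((fun q : String × String => q.1 == g) ∘ (fun g' => (g', p.1)))).length =
      if g ∈ p.2 then 1 else 0 := by
    have : ((fun q : String × String => q.1 == g) ∘ (fun g' => (g', p.1))) = (fun g' => g' == g) := by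
      funext g'; simp [Function.comp]
    rw [this, ← List.countP_eq_length_filter, ← List.count_eq_countP]
    by_cases hg : g ∈ p.2
    · simp [hg, List.count_eq_one_of_mem hnd hg]
    · simp [hg, List.count_eq_zero_of_not_mem hg]
  rw [hlen]
  by_cases hp : p.1 = k <;> by_cases hg : g ∈ p.2 <;> simp [hp, hg]

-- a sum of per-entry indicators over a Nodup-keyed list collapses to the unique hit
lemma pv_sum_zero_of_no_key (k : String) (w : String × List String → Nat) :
    ∀ (L : List (String × List String)), (∀ p ∈ L, p.1 ≠ k) →
    (L.map (fun p => if p.1 = k then w p else 0)).sum = 0 := by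
  intro L hL
  induction L with
  | nil => rfl
  | cons p t ih =>
    simp only [List.map_cons, List.sum_cons, if_neg (hL p (by simp)),
      ih (fun q hq => hL q (by simp [hq])), Nat.zero_add]

lemma pv_sum_hit (k : String) (w : String × List String → Nat) :
    ∀ (L : List (String × List String)), (L.map Prod.fst).Nodup →
    ∀ p0 ∈ L, p0.1 = k →
    (L.map (fun p => if p.1 = k then w p else 0)).sum = w p0 := by
  intro L
  induction L with
  | nil => intro _ p0 h; exact absurd h (by simp)
  | cons p t ih =>
    intro hnd p0 hp0 hk
    have hnd' : (t.map Prod.fst).Nodup := (List.nodup_cons.mp (by simpa using hnd)).2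
    have hpt : p.1 ∉ t.map Prod.fst := (List.nodup_cons.mp (by simpa using hnd)).1
    rcases List.mem_cons.mp hp0 with hp0 | hp0
    · subst hp0
      have hz : (t.map (fun q => if q.1 = k then w q else 0)).sum = 0 := by
        refine pv_sum_zero_of_no_key k w t (fun q hq hqk => hpt ?_)
        have : q.1 ∈ t.map Prod.fst := List.mem_map_of_mem hq
        rw [hqk] at this
        rw [hk]
        exact this
      simp [hk, hz]
    · have hpk : p.1 ≠ k := by
        intro h
        have : p0.1 ∈ t.map Prod.fst := List.mem_map_of_mem hp0
        rw [hk] at this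
        rw [h] at hpt
        exact hpt this
      simp only [List.map_cons, List.sum_cons, if_neg hpk, Nat.zero_add]
      exact ih hnd' p0 hp0 hk

-- one index block of B, written out, and its count of a language
lemma pv_idxList_count (g k : String) (L : List (String × List String))
    (hsets : ∀ p ∈ L, p.2.Nodup) :
    (((L.flatMap (fun p => p.2.map (fun g' => (g', p.1)))).filter (fun q => q.1 == g)).map
      (fun q : String × String => q.2)).count k =
    (L.map (fun p => if p.1 = k then (if g ∈ p.2 then 1 else 0) else 0)).sum := by
  induction L with
  | nil => rfl
  | cons p t ih =>
    simp only [List.flatMap_cons, List.filter_append, List.map_append, List.count_append,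
      List.map_cons, List.sum_cons]
    rw [pv_entry_count p g k (hsets p (by simp)), ih (fun q hq => hsets q (by simp [hq]))]
    congr 1
    by_cases hp : p.1 = k <;> by_cases hg : g ∈ p.2 <;> simp [hp, hg]

-- a 0/1 indicator sum is a countP
lemma pv_sum_indicator (gs : List String) (cs : List String) :
    (gs.map (fun g => if g ∈ cs then 1 else 0)).sum = gs.countP (fun g => cs.contains g) := by
  induction gs with
  | nil => rfl
  | cons g t ih =>
    simp only [List.map_cons, List.sum_cons, List.countP_cons, ih]
    by_cases hg : g ∈ cs <;> simp [hg, Nat.add_comm]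

-- ===== VERDICT (by name: the statement is the Claim_ definition above) =====
set_option maxHeartbeats 1000000 in
theorem predict_language_spec : Claim_equal_predict_language := by
  intro text lang2char hdom hpre
  obtain ⟨hne, hnd, hsets⟩ := hpre
  unfold Spec_predict_language
  simp only [predict_language, predict_language_alt, ← pv_grams_eq]
  rw [pv_si_split]
  simp only []
  set cleaned := (PySem.Str.lower text).toList.filter (fun c => !(pvPunct.contains c)) with hcl
  set tn : PySem.Set String := PySem.Set.ofList (n_grams cleaned 3) with htn
  set f : String × List String → Int :=
    fun p => PySem.Set.len (PySem.Set.inter tn p.2) with hf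
  rw [pv_idx_flatten, pv_sc_flatten]
  set P : List (String × String) :=
    lang2char.flatMap (fun p => p.2.map (fun g => (g, p.1))) with hP
  set idx : PySem.Dict String (List String) :=
    P.foldl (fun d q => d.modify q.1 [] (fun ls => ls ++ [q.2])) PySem.Dict.empty with hidx
  set sc0 : PySem.Dict String Int :=
    lang2char.foldl (fun sc p => sc.insert p.1 0) PySem.Dict.empty with hsc0
  set Q : List String := tn.flatMap (fun g => idx.getD g []) with hQ
  set sc : PySem.Dict String Int :=
    Q.foldl (fun sc l => sc.modify l 0 (· + 1)) sc0 with hsc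
  set dA : PySem.Dict String Int :=
    lang2char.foldl (fun d p => d.insert p.1 (f p)) PySem.Dict.empty with hdA
  clear_value cleaned tn f P idx sc0 Q sc dA
  -- the index blocks, written out
  have hidxList : ∀ g, idx.getD g [] = (P.filter (fun q => q.1 == g)).map
      (fun q : String × String => q.2) := by
    intro g
    rw [hidx, PySem.Dict.getD_foldl_modify_append, PySem.Dict.getD_empty]
    rfl
  -- A's dict, written out
  have hitems : dA.items = lang2char.map (fun p => (p.1, f p)) := by
    rw [hdA]
    have := PySem.Dict.items_foldl_insert_fresh lang2char (fun p => p.1) f PySem.Dict.empty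
      (by intro a _; simp [PySem.Dict.contains_empty]) hnd
    simpa using this
  have hkeysA : dA.keys = lang2char.map Prod.fst := by
    simp only [PySem.Dict.keys, hitems, List.map_map]
    rfl
  have hndkA : dA.keys.Nodup := by rw [hkeysA]; exact hnd
  -- every language B's index mentions is a key of the score dict
  have hQsub : ∀ y ∈ Q, y ∈ lang2char.map Prod.fst := by
    intro y hy
    rw [hQ] at hy
    obtain ⟨g, -, hyg⟩ := List.mem_flatMap.mp hy
    rw [hidxList g] at hyg
    obtain ⟨q, hqmem, rfl⟩ := List.mem_map.mp hyg
    have hqP : q ∈ P := (List.mem_filter.mp hqmem).1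
    rw [hP] at hqP
    obtain ⟨p, hpL, hqp⟩ := List.mem_flatMap.mp hqP
    obtain ⟨g', -, rfl⟩ := List.mem_map.mp hqp
    exact List.mem_map_of_mem hpL
  -- B's keys are A's keys
  have hkeys0 : sc0.keys = lang2char.map Prod.fst := by
    rw [hsc0]
    rw [PySem.Dict.keys_foldl_insert_key (key := fun p : String × List String => p.1)
      (f := fun _ _ => (0 : Int))]
    rw [PySem.Dict.keys_empty, PySem.Set.update_nil_left]
    have h1 : (List.map (fun p : String × List String => p.1) lang2char).Nodup := hnd
    exact PySem.Set.ofList_eq_self_of_nodup _ h1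
  have hkeysB : sc.keys = lang2char.map Prod.fst := by
    rw [hsc]
    rw [PySem.Dict.keys_foldl_modify (d0 := (0 : Int)) (f := fun _ _ => (· + 1))]
    rw [hkeys0, PySem.Set.update_eq_append_filter]
    have : (PySem.Set.ofList Q).filter
        (fun y => !(PySem.Set.contains (lang2char.map Prod.fst) y)) = [] := by
      rw [List.filter_eq_nil_iff]
      intro y hy
      have hyQ : y ∈ Q := (PySem.Set.mem_ofList _ _).mp hy
      simp [PySem.Set.contains, hQsub y hyQ]
    rw [this, List.append_nil]
  -- every default-0 lookup agrees between the two dicts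
  have hval : ∀ k, dA.getD k 0 = sc.getD k 0 := by
    intro k
    have hscval : sc.getD k 0 = ((Q.count k : Nat) : Int) := by
      rw [hsc, PySem.Dict.getD_foldl_modify_add_one]
      rw [hsc0, pv_sc0_getD _ _ (fun k' => PySem.Dict.getD_empty ..) k, Int.zero_add]
    have hQcount : Q.count k =
        (tn.map (fun g =>
          (lang2char.map (fun p => if p.1 = k then (if g ∈ p.2 then 1 else 0) else 0)).sum)).sum := by
      rw [hQ, pv_count_flatMap]
      refine congrArg List.sum ?_
      refine List.map_congr_left (fun g _ => ?_)
      rw [hidxList g, hP, pv_idxList_count g k lang2char hsets]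
    by_cases hk : k ∈ lang2char.map Prod.fst
    · obtain ⟨p0, hp0, hp0k⟩ := List.mem_map.mp hk
      have hA : dA.getD k 0 = f p0 := by
        refine PySem.Dict.getD_of_mem_items (d := dA) (k := k) (v := f p0) ?_ hndkA 0
        rw [hitems]
        have : (p0.1, f p0) ∈ lang2char.map (fun p => (p.1, f p)) := List.mem_map_of_mem hp0
        rwa [hp0k] at this
      have hsum : ∀ g, (lang2char.map
          (fun p => if p.1 = k then (if g ∈ p.2 then 1 else 0) else 0)).sum =
          if g ∈ p0.2 then 1 else 0 := fun g =>
        pv_sum_hit k (fun p => if g ∈ p.2 then 1 else 0) lang2char hnd p0 hp0 hp0k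
      have : Q.count k = tn.countP (fun g => p0.2.contains g) := by
        rw [hQcount]
        have : tn.map (fun g =>
            (lang2char.map (fun p => if p.1 = k then (if g ∈ p.2 then 1 else 0) else 0)).sum) =
            tn.map (fun g => if g ∈ p0.2 then 1 else 0) :=
          List.map_congr_left (fun g _ => hsum g)
        rw [this, pv_sum_indicator]
      rw [hA, hscval, this, hf]
      exact pv_inter_len tn p0.2
    · have hA : dA.getD k 0 = 0 := by
        refine PySem.Dict.getD_of_not_contains (d := dA) (k := k) 0 ?_
        rw [PySem.Dict.contains_eq_decide_mem_keys, hkeysA]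
        simpa using hk
      have hz : Q.count k = 0 := by
        rw [hQcount]
        have : ∀ g ∈ tn, (lang2char.map
            (fun p => if p.1 = k then (if g ∈ p.2 then 1 else 0) else 0)).sum = 0 := by
          intro g _
          refine pv_sum_zero_of_no_key k (fun p => if g ∈ p.2 then 1 else 0) lang2char ?_
          intro p hp hpk
          exact hk (hpk ▸ List.mem_map_of_mem hp)
        rw [List.map_congr_left this]
        simp
      rw [hA, hscval, hz]
      rfl
  rw [hkeysA, hkeysB, show (fun k => dA.getD k 0) = (fun k => sc.getD k 0) from funext hval]
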